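-- pv_equiv track=rewrite | github.com/miklosaubert/nanook | nanook/midi/utils.py | midi_from_scene_dump
-- ===== SOURCE A (Python) =====
-- def midi_from_scene_dump(dump):
--     midi = []
--     for i in range(0, len(dump), 7):
--         msbs = sum([(dump[i + j] >> 7) << j for j in range(0, 7)])
--         lsbs = [dump[i + j] & 127 for j in range(0, 7)]
--         midi.append(msbs)
--         midi += lsbs
--     return tuple(midi)
-- ===== SOURCE B (Python) =====
-- def midi_from_scene_dump(dump):
--     midi = []
--     rest = list(dump)
--     while rest:
--         b0, b1, b2, b3, b4, b5, b6 = rest[:7]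
--         rest = rest[7:]
--         msb = 0
--         for b in (b6, b5, b4, b3, b2, b1, b0):
--             msb = 2 * msb + (b >> 7)
--         midi.append(msb)
--         midi += [b & 127 for b in (b0, b1, b2, b3, b4, b5, b6)]
--     return tuple(midi)
-- ===== Notes on version B (the rewrite author's own statement) =====
-- stated objective: alternative
-- what changed: B peels the dump chunk-by-chunk with list slicing (rest[:7]/rest[7:]) and reconstructs the MSB byte by a Horner loop over the reversed chunk, instead of A's index arithmetic over range(0, len, 7) with a per-bit shifted-and-summed comprehension.
import Mathlib
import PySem

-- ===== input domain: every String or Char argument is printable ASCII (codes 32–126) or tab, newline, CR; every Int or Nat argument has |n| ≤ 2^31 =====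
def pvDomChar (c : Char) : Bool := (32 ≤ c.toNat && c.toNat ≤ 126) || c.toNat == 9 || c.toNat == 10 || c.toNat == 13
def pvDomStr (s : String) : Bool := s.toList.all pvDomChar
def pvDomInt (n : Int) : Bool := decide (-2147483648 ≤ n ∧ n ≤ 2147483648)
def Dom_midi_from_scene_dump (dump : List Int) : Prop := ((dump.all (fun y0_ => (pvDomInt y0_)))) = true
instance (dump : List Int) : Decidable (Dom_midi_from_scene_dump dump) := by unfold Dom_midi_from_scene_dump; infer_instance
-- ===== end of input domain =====

-- B decodes the dump chunk-by-chunk (unpacking each 7-byte slice and Horner-accumulating the MSB bits) instead of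
-- A's index arithmetic over range(0, len, 7) with a per-bit shifted sum; objective: alternative decomposition, same cost.

-- ===== PORT A =====
-- literal transliteration of A; dump[i+j] is pyGetD (in range for every admitted input, see Pre_);
-- the shift amount j of '<< j' is taken as j.toNat, exact since j ∈ range(0,7) is nonnegative
def midi_from_scene_dump (dump : List Int) : List Int :=
  (PySem.List.pyRange 0 (dump.length : Int) 7).foldl
    (fun midi i =>
      let msbs := ((PySem.List.pyRange 0 7 1).map
        (fun j => ((PySem.List.pyGetD dump (i + j) 0) >>> 7) <<< j.toNat)).sum
      let lsbs := (PySem.List.pyRange 0 7 1).map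
        (fun j => PySem.Int.band (PySem.List.pyGetD dump (i + j) 0) 127)
      midi ++ [msbs] ++ lsbs) []

-- ===== PORT B =====
-- literal transliteration of Source B: unpack the 7-byte chunk, Horner loop (b6..b0) for the MSB byte, recurse on rest[7:];
-- the catch-all arm is the nonempty list shorter than 7, where Python B raises ValueError (outside Pre_), and []
def midi_from_scene_dump_alt : List Int → List Int
  | b0 :: b1 :: b2 :: b3 :: b4 :: b5 :: b6 :: rest =>
      let msb := [b6, b5, b4, b3, b2, b1, b0].foldl (fun (m b : Int) => 2 * m + (b >>> 7)) (0 : Int)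
      (msb :: [b0, b1, b2, b3, b4, b5, b6].map (fun b : Int => PySem.Int.band b 127))
        ++ midi_from_scene_dump_alt rest
  | _ => []

-- ===== PRECONDITION & SPEC =====
-- Pre_ excludes exactly the inputs where A raises IndexError: a length not divisible by 7
def Pre_midi_from_scene_dump (dump : List Int) : Prop := dump.length % 7 = 0
instance (dump : List Int) : Decidable (Pre_midi_from_scene_dump dump) := by
  unfold Pre_midi_from_scene_dump; infer_instance

def pvWitness_midi_from_scene_dump : List Int := [128, 1, 2, 3, 4, 5, 6]

def Spec_midi_from_scene_dump (dump : List Int) (out : List Int) : Prop := out = midi_from_scene_dump_alt dump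
instance (dump : List Int) (out : List Int) : Decidable (Spec_midi_from_scene_dump dump out) := by
  unfold Spec_midi_from_scene_dump; infer_instance

-- ===== CLAIM (what is proved, stated in full; the proofs are below) =====
def Claim_equal_midi_from_scene_dump : Prop := ∀ (dump : List Int), Dom_midi_from_scene_dump dump → Pre_midi_from_scene_dump dump → Spec_midi_from_scene_dump dump (midi_from_scene_dump dump)

-- ===== LEMMAS AND PROOFS =====

-- the body A appends for chunk start i
def gA (dump : List Int) (i : Int) : List Int :=
  ((PySem.List.pyRange 0 7 1).map
    (fun j => ((PySem.List.pyGetD dump (i + j) 0) >>> 7) <<< j.toNat)).sum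
  :: (PySem.List.pyRange 0 7 1).map
    (fun j => PySem.Int.band (PySem.List.pyGetD dump (i + j) 0) 127)

lemma range7 : PySem.List.pyRange 0 7 1 = [0, 1, 2, 3, 4, 5, 6] := by decide

lemma A_flat (dump : List Int) (K : Nat) (h : dump.length = 7 * K) :
    midi_from_scene_dump dump
      = (List.range K).flatMap (fun k : Nat => gA dump (7 * (k : Int))) := by
  unfold midi_from_scene_dump
  have hb : (fun (midi : List Int) (i : Int) =>
      let msbs := ((PySem.List.pyRange 0 7 1).map
        (fun j => ((PySem.List.pyGetD dump (i + j) 0) >>> 7) <<< j.toNat)).sum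
      let lsbs := (PySem.List.pyRange 0 7 1).map
        (fun j => PySem.Int.band (PySem.List.pyGetD dump (i + j) 0) 127)
      midi ++ [msbs] ++ lsbs)
      = fun midi i => midi ++ gA dump i := by
    funext midi i
    simp [gA]
  rw [hb, PySem.List.foldl_append_eq_flatMap, h]
  rw [PySem.List.pyRange_of_pos 0 ((7 * K : Nat) : Int) (by norm_num : (0:Int) < 7)]
  have hcount : (if (0:Int) < ((7*K : Nat) : Int)
      then ((((7*K : Nat) : Int) - 0 + 7 - 1) / 7).toNat else 0) = K := by
    split_ifs with hpos
    · omega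
    · omega
  rw [hcount]
  simp [List.flatMap_map]

lemma getD_shift7 (x0 x1 x2 x3 x4 x5 x6 : Int) (rest : List Int) (n : Nat) :
    PySem.List.pyGetD (x0 :: x1 :: x2 :: x3 :: x4 :: x5 :: x6 :: rest) ((n : Int) + 7) 0
      = PySem.List.pyGetD rest (n : Int) 0 := by
  have h : ((n : Int) + 7) = ((n + 7 : Nat) : Int) := by push_cast; ring
  rw [h, PySem.List.pyGetD_natCast, PySem.List.pyGetD_natCast]
  simp [List.getD_eq_getElem?_getD]

lemma g_shift (x0 x1 x2 x3 x4 x5 x6 : Int) (rest : List Int) (k : Nat) :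
    gA (x0 :: x1 :: x2 :: x3 :: x4 :: x5 :: x6 :: rest) (7 * ((k : Int) + 1))
      = gA rest (7 * (k : Int)) := by
  simp only [gA, range7, List.map_cons, List.map_nil]
  have e0 : 7 * ((k : Int) + 1) + 0 = ((7 * k + 0 : Nat) : Int) + 7 := by push_cast; ring
  have e1 : 7 * ((k : Int) + 1) + 1 = ((7 * k + 1 : Nat) : Int) + 7 := by push_cast; ring
  have e2 : 7 * ((k : Int) + 1) + 2 = ((7 * k + 2 : Nat) : Int) + 7 := by push_cast; ring
  have e3 : 7 * ((k : Int) + 1) + 3 = ((7 * k + 3 : Nat) : Int) + 7 := by push_cast; ring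
  have e4 : 7 * ((k : Int) + 1) + 4 = ((7 * k + 4 : Nat) : Int) + 7 := by push_cast; ring
  have e5 : 7 * ((k : Int) + 1) + 5 = ((7 * k + 5 : Nat) : Int) + 7 := by push_cast; ring
  have e6 : 7 * ((k : Int) + 1) + 6 = ((7 * k + 6 : Nat) : Int) + 7 := by push_cast; ring
  rw [e0, e1, e2, e3, e4, e5, e6]
  rw [getD_shift7, getD_shift7, getD_shift7, getD_shift7, getD_shift7, getD_shift7, getD_shift7]
  have c0 : 7 * (k : Int) + 0 = ((7 * k + 0 : Nat) : Int) := by push_cast; ring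
  have c1 : 7 * (k : Int) + 1 = ((7 * k + 1 : Nat) : Int) := by push_cast; ring
  have c2 : 7 * (k : Int) + 2 = ((7 * k + 2 : Nat) : Int) := by push_cast; ring
  have c3 : 7 * (k : Int) + 3 = ((7 * k + 3 : Nat) : Int) := by push_cast; ring
  have c4 : 7 * (k : Int) + 4 = ((7 * k + 4 : Nat) : Int) := by push_cast; ring
  have c5 : 7 * (k : Int) + 5 = ((7 * k + 5 : Nat) : Int) := by push_cast; ring
  have c6 : 7 * (k : Int) + 6 = ((7 * k + 6 : Nat) : Int) := by push_cast; ring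
  rw [c0, c1, c2, c3, c4, c5, c6]

lemma g_head (x0 x1 x2 x3 x4 x5 x6 : Int) (rest : List Int) :
    gA (x0 :: x1 :: x2 :: x3 :: x4 :: x5 :: x6 :: rest) 0
      = (([x6, x5, x4, x3, x2, x1, x0].foldl (fun (m b : Int) => 2 * m + (b >>> 7)) (0 : Int))
          :: [x0, x1, x2, x3, x4, x5, x6].map (fun b : Int => PySem.Int.band b 127)) := by
  simp only [gA, range7, List.map_cons, List.map_nil, List.sum_cons, List.sum_nil]
  norm_num [pysem, Int.shiftLeft_eq, List.foldl_cons, List.foldl_nil]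
  simp only [show Int.toNat 2 = 2 from rfl, show Int.toNat 3 = 3 from rfl,
    show Int.toNat 4 = 4 from rfl, show Int.toNat 5 = 5 from rfl, show Int.toNat 6 = 6 from rfl]
  norm_num
  ring

lemma alt_nil : midi_from_scene_dump_alt [] = [] := rfl

lemma alt_cons (x0 x1 x2 x3 x4 x5 x6 : Int) (rest : List Int) :
    midi_from_scene_dump_alt (x0 :: x1 :: x2 :: x3 :: x4 :: x5 :: x6 :: rest)
      = (([x6, x5, x4, x3, x2, x1, x0].foldl (fun (m b : Int) => 2 * m + (b >>> 7)) (0 : Int))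
          :: [x0, x1, x2, x3, x4, x5, x6].map (fun b : Int => PySem.Int.band b 127))
        ++ midi_from_scene_dump_alt rest := rfl

lemma main_eq : ∀ (K : Nat) (dump : List Int), dump.length = 7 * K →
    midi_from_scene_dump dump = midi_from_scene_dump_alt dump := by
  intro K
  induction K with
  | zero =>
      intro dump h
      have : dump = [] := List.eq_nil_of_length_eq_zero (by omega)
      subst this
      rw [show midi_from_scene_dump [] = ([] : List Int) from by decide, alt_nil]
  | succ K ih =>
      intro dump h
      rcases dump with _ | ⟨x0, _ | ⟨x1, _ | ⟨x2, _ | ⟨x3, _ | ⟨x4, _ | ⟨x5, _ | ⟨x6, rest⟩⟩⟩⟩⟩⟩⟩ <;>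
        simp only [List.length_nil, List.length_cons] at h <;> try omega
      have hrest : rest.length = 7 * K := by omega
      rw [A_flat _ (K + 1) (by simpa using h), List.range_succ_eq_map, List.flatMap_cons,
        List.flatMap_map]
      have hmap : ∀ k ∈ List.range K,
          gA (x0 :: x1 :: x2 :: x3 :: x4 :: x5 :: x6 :: rest) (7 * ((Nat.succ k : Nat) : Int))
            = gA rest (7 * (k : Int)) := by
        intro k _
        have hs : ((Nat.succ k : Nat) : Int) = (k : Int) + 1 := by push_cast; ring
        rw [hs]
        exact g_shift x0 x1 x2 x3 x4 x5 x6 rest k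
      rw [List.flatMap_congr hmap]
      have htail : (List.range K).flatMap (fun k : Nat => gA rest (7 * (k : Int)))
          = midi_from_scene_dump_alt rest := by
        rw [← A_flat rest K hrest]; exact ih rest hrest
      rw [htail]
      have hz : (7 : Int) * ((0 : Nat) : Int) = 0 := by norm_num
      rw [hz, g_head, alt_cons]

-- ===== VERDICT (by name: the statement is the Claim_ definition above) =====
theorem midi_from_scene_dump_spec : Claim_equal_midi_from_scene_dump := by
  intro dump _ hpre
  unfold Spec_midi_from_scene_dump
  have ⟨K, hK⟩ : ∃ K, dump.length = 7 * K := ⟨dump.length / 7, by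
    have := hpre; unfold Pre_midi_from_scene_dump at this; omega⟩
  exact main_eq K dump hK
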